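-- pv_equiv track=rewrite | github.com/ShingZhanho/HKU-Notes | build/page_gen_tools/utils.py | get_targets_dict
-- ===== SOURCE A (Python) =====
-- def get_targets_dict(targets: list[str]) -> dict[str, dict[str, list[str]]]:
--     """
--     Converts the list of target strings into a nested dictionary structure.
--     Structure:
--     {
--         "leading_alphabet": {
--                 "course_code": [list_of_full_target_names]
--         }
--     }
--     There must be exactly 27 leading alphabets: A-Z and '#' for Miscellaneous.
--     Some leading_alphabets may have empty dictionaries if no targets start with that letter.
--     """
--     alphas = {chr(i): {} for i in range(ord('A'), ord('Z') + 1)}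
--     alphas['#'] = {"Miscellaneous": []}
--
--     def __is_course_code(s: str) -> bool:
--         return len(s) >= 8 and s[:4].isalpha() and s[4:8].isdigit()
--
--     # arrange targets into the dictionary
--     for target in targets:
--         if len(target) <= 8 or not __is_course_code(target[:9]):
--             alphas['#']["Miscellaneous"].append(target)
--             continue
--
--         leading_alpha = target[0].upper()
--         course_code = target[:9]
--         if course_code not in alphas[leading_alpha]:
--             alphas[leading_alpha][course_code] = []
--         alphas[leading_alpha][course_code].append(target)
--
--     # sort all course codes and target names
--     for leading_alpha in alphas:
--         alphas[leading_alpha] = dict(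
--             sorted(alphas[leading_alpha].items())
--         )
--         for course_code in alphas[leading_alpha]:
--             alphas[leading_alpha][course_code].sort()
--
--     return alphas
-- ===== SOURCE B (Python) =====
-- def get_targets_dict(targets: list[str]) -> dict[str, dict[str, list[str]]]:
--     alphas = {chr(i): {} for i in range(ord('A'), ord('Z') + 1)}
--     alphas['#'] = {"Miscellaneous": []}
--     # One pass over the pre-sorted targets: every sublist and every key sequence
--     # is produced already in sorted order, so no trailing sort stage is needed.
--     for target in sorted(targets):
--         if len(target) > 8 and target[:4].isalpha() and target[4:8].isdigit():
--             alphas[target[0].upper()].setdefault(target[:9], []).append(target)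
--         else:
--             alphas['#']["Miscellaneous"].append(target)
--     return alphas
-- ===== Notes on version B (the rewrite author's own statement) =====
-- stated objective: alternative
-- what changed: B sorts the target list once up front and builds the nested dict in a single pass with setdefault, so every course-code key sequence and every target sublist comes out already sorted and A's whole trailing sort-and-rebuild stage (re-sorting each letter's items and each list) disappears.
import Mathlib
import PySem

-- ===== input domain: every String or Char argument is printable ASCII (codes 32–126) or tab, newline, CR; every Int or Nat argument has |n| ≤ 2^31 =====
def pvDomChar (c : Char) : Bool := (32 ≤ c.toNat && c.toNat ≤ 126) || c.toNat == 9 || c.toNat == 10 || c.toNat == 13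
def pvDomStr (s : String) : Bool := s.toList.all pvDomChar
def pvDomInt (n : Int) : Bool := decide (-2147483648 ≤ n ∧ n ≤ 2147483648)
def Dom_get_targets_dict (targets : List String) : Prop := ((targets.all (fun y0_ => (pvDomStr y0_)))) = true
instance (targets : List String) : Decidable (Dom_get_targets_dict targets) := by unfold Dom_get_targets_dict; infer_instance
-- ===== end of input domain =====

-- B groups the pre-sorted targets in one pass instead of building unsorted groups and sorting
-- every key list and value list afterwards; return values proved equal, no argument is mutated.

-- ===== PORT A =====
-- helper __is_course_code
def pv_is_course_code (s : String) : Bool :=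
  decide (8 ≤ PySem.Str.len s) && PySem.Str.strIsalpha (PySem.Str.slice s none (some 4)) &&
    PySem.Str.strIsdigit (PySem.Str.slice s (some 4) (some 8))

def get_targets_dict (targets : List String) : List (String × List (String × List String)) :=
  let alphas : PySem.Dict String (PySem.Dict String (List String)) :=
    PySem.Dict.ofList ((PySem.List.pyRange 65 91 1).map
      (fun i => (String.ofList [Char.ofNat i.toNat], PySem.Dict.empty)))
  let alphas := alphas.insert "#" (PySem.Dict.ofList [("Miscellaneous", ([] : List String))])
  let alphas := targets.foldl (fun alphas target =>
    if PySem.Str.len target ≤ 8 || !pv_is_course_code (PySem.Str.slice target none (some 9)) then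
      -- alphas['#']["Miscellaneous"].append(target); both keys are always present
      alphas.insert "#" ((alphas.getD "#" PySem.Dict.empty).insert "Miscellaneous"
        ((alphas.getD "#" PySem.Dict.empty).getD "Miscellaneous" [] ++ [target]))
    else
      -- leading_alpha = target[0].upper(): index 0 is in range (len > 8), so .getD 'A' is unreachable
      let leading_alpha := String.ofList [PySem.Chars.upperChar ((PySem.Str.pyGet? target 0).getD 'A')]
      let course_code := PySem.Str.slice target none (some 9)
      let inner := alphas.getD leading_alpha PySem.Dict.empty
      let inner := if inner.contains course_code then inner else inner.insert course_code []
      alphas.insert leading_alpha (inner.insert course_code (inner.getD course_code [] ++ [target]))) alphas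
  -- 'for la in alphas: alphas[la] = dict(sorted(alphas[la].items()))' reassigns each existing key in
  -- place, i.e. maps over the items; sorted(d.items()) compares (code, list) tuples and dict keys are
  -- unique, so the tuple comparison is decided by the code alone: sorted with key = fst is exact here.
  -- The inner 'alphas[la][cc].sort()' loop is the inner map; returning the dict yields its items.
  alphas.items.map (fun p =>
    (p.1, (PySem.List.sorted p.2.items (fun q => q.1)).map
            (fun q => (q.1, PySem.List.sorted q.2 (fun x => x)))))

-- ===== PORT B =====
def get_targets_dict_alt (targets : List String) : List (String × List (String × List String)) :=
  let alphas : PySem.Dict String (PySem.Dict String (List String)) :=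
    PySem.Dict.ofList ((PySem.List.pyRange 65 91 1).map
      (fun i => (String.ofList [Char.ofNat i.toNat], PySem.Dict.empty)))
  let alphas := alphas.insert "#" (PySem.Dict.ofList [("Miscellaneous", ([] : List String))])
  let alphas := (PySem.List.sorted targets (fun x => x)).foldl (fun alphas target =>
    if decide (8 < PySem.Str.len target) && PySem.Str.strIsalpha (PySem.Str.slice target none (some 4)) &&
        PySem.Str.strIsdigit (PySem.Str.slice target (some 4) (some 8)) then
      -- alphas[target[0].upper()].setdefault(target[:9], []).append(target)
      let inner := (alphas.getD (String.ofList [PySem.Chars.upperChar ((PySem.Str.pyGet? target 0).getD 'A')])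
          PySem.Dict.empty).setdefault (PySem.Str.slice target none (some 9)) []
      alphas.insert (String.ofList [PySem.Chars.upperChar ((PySem.Str.pyGet? target 0).getD 'A')])
        (inner.insert (PySem.Str.slice target none (some 9))
          (inner.getD (PySem.Str.slice target none (some 9)) [] ++ [target]))
    else
      alphas.insert "#" ((alphas.getD "#" PySem.Dict.empty).insert "Miscellaneous"
        ((alphas.getD "#" PySem.Dict.empty).getD "Miscellaneous" [] ++ [target]))) alphas
  alphas.items.map (fun p => (p.1, p.2.items))

-- ===== PRECONDITION & SPEC =====
def Spec_get_targets_dict (targets : List String) (out : List (String × List (String × List String))) : Prop := out = get_targets_dict_alt targets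
instance (targets : List String) (out : List (String × List (String × List String))) : Decidable (Spec_get_targets_dict targets out) := by unfold Spec_get_targets_dict; infer_instance

-- ===== CLAIM (what is proved, stated in full; the proofs are below) =====
def Claim_equal_get_targets_dict : Prop := ∀ (targets : List String), Dom_get_targets_dict targets → Spec_get_targets_dict targets (get_targets_dict targets)

-- ===== LEMMAS AND PROOFS =====

-- classification shared by both programs
def pvValid (t : String) : Bool :=
  decide (8 < PySem.Str.len t) && PySem.Str.strIsalpha (PySem.Str.slice t none (some 4)) &&
    PySem.Str.strIsdigit (PySem.Str.slice t (some 4) (some 8))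

def pvCode (t : String) : String := PySem.Str.slice t none (some 9)

def pvLetter (t : String) : String :=
  String.ofList [PySem.Chars.upperChar ((PySem.Str.pyGet? t 0).getD 'A')]

def pvBucket (t : String) : String := if pvValid t then pvLetter t else "#"

def pvKey (t : String) : String := if pvValid t then pvCode t else "Miscellaneous"

def pvStep (d : PySem.Dict String (List String)) (t : String) : PySem.Dict String (List String) :=
  d.modify (pvKey t) [] (· ++ [t])

def pvOuterStep (d : PySem.Dict String (PySem.Dict String (List String))) (t : String) :
    PySem.Dict String (PySem.Dict String (List String)) :=
  d.insert (pvBucket t) (pvStep (d.getD (pvBucket t) PySem.Dict.empty) t)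

def pvLetters : List String := (List.range' 65 26).map (fun n => String.ofList [Char.ofNat n]) ++ ["#"]

def pvInit (L : String) : PySem.Dict String (List String) :=
  if L = "#" then PySem.Dict.mk [("Miscellaneous", [])] else PySem.Dict.empty

def pvGroup (L : String) (ts : List String) : PySem.Dict String (List String) :=
  (ts.filter (fun t => pvBucket t == L)).foldl pvStep (pvInit L)

def pvInitDict : PySem.Dict String (PySem.Dict String (List String)) :=
  (PySem.Dict.ofList ((PySem.List.pyRange 65 91 1).map
      (fun i => (String.ofList [Char.ofNat i.toNat], PySem.Dict.empty)))).insert "#"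
    (PySem.Dict.ofList [("Miscellaneous", ([] : List String))])

lemma pvInitDict_items : pvInitDict.items = pvLetters.map (fun L => (L, pvInit L)) := by decide

lemma pvLetters_nodup : pvLetters.Nodup := by decide

-- A's membership guard is the negation of B's
lemma pv_guard_A (t : String) :
    (PySem.Str.len t ≤ 8 || !pv_is_course_code (PySem.Str.slice t none (some 9))) = !pvValid t := by
  simp only [pv_is_course_code, pvValid, pysem]
  simp [pysem, PySem.Chars.strIsalpha, PySem.Chars.strIsdigit]
  simp [List.take_take, List.drop_take]
  by_cases h : 8 < t.length
  · have h1 : ¬ t.length ≤ 8 := by omega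
    have h2 : 8 ≤ t.length := by omega
    simp [h, h1, h2]
  · have h1 : t.length ≤ 8 := by omega
    simp [h, h1]

lemma upperChar_range (c : Char) (h : PySem.Chars.isalpha c = true) :
    65 ≤ (PySem.Chars.upperChar c).toNat ∧ (PySem.Chars.upperChar c).toNat ≤ 90 := by
  simp only [PySem.Chars.isalpha, PySem.Chars.isupper, PySem.Chars.islower, Bool.or_eq_true,
    Bool.and_eq_true, decide_eq_true_eq, Char.le_def] at h
  simp only [PySem.Chars.upperChar, PySem.Chars.islower, Bool.and_eq_true, decide_eq_true_eq,
    Char.le_def]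
  rcases h with ⟨h1, h2⟩ | ⟨h1, h2⟩ <;>
    rw [UInt32.le_iff_toNat_le] at h1 h2
  · have hA : (65 : Nat) ≤ c.val.toNat := h1
    have hZ : c.val.toNat ≤ 90 := h2
    rw [if_neg]
    · exact ⟨hA, hZ⟩
    · rintro ⟨g1, g2⟩
      rw [UInt32.le_iff_toNat_le] at g1
      have : (97 : Nat) ≤ c.val.toNat := g1
      omega
  · have ha : (97 : Nat) ≤ c.val.toNat := h1
    have hz : c.val.toNat ≤ 122 := h2
    rw [if_pos]
    · have hv : (c.toNat - 32).isValidChar := by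
        have : c.toNat = c.val.toNat := rfl
        constructor; omega
      rw [Char.toNat_ofNat, if_pos hv]
      have : c.toNat = c.val.toNat := rfl
      omega
    · constructor <;> rw [UInt32.le_iff_toNat_le]
      · exact h1
      · exact h2

lemma pvValid_head (t : String) (h : pvValid t = true) :
    ∃ c rest, t.toList = c :: rest ∧ PySem.Chars.isalpha c = true := by
  simp only [pvValid, Bool.and_eq_true, decide_eq_true_eq] at h
  obtain ⟨⟨h8, ha⟩, -⟩ := h
  simp only [pysem] at h8 ha
  match e : t.toList, h8 with
  | c :: rest, _ =>
    refine ⟨c, rest, rfl, ?_⟩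
    rw [e] at ha
    simp [pysem, PySem.Chars.strIsalpha] at ha
    exact ha.1
  | [], h8 => simp at h8

lemma pvLetter_mem (t : String) (h : pvValid t = true) : pvLetter t ∈ pvLetters := by
  obtain ⟨c, rest, e, hc⟩ := pvValid_head t h
  have e0 : (PySem.Str.pyGet? t 0).getD 'A' = c := by simp [pysem, e]
  obtain ⟨g1, g2⟩ := upperChar_range c hc
  unfold pvLetter pvLetters
  rw [e0]
  refine List.mem_append_left _ ?_
  refine List.mem_map.mpr ⟨(PySem.Chars.upperChar c).toNat, ?_, ?_⟩
  · rw [List.mem_range']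
    exact ⟨(PySem.Chars.upperChar c).toNat - 65, by omega, by omega⟩
  · rw [Char.ofNat_toNat]

lemma pvLetter_ne_hash (t : String) (h : pvValid t = true) : pvLetter t ≠ "#" := by
  obtain ⟨c, rest, e, hc⟩ := pvValid_head t h
  have e0 : (PySem.Str.pyGet? t 0).getD 'A' = c := by simp [pysem, e]
  obtain ⟨g1, g2⟩ := upperChar_range c hc
  unfold pvLetter
  rw [e0]
  intro hEq
  have : PySem.Chars.upperChar c = '#' := by
    have := congrArg String.toList hEq
    simpa using this
  rw [this] at g1
  simp at g1

lemma pvBucket_mem (t : String) : pvBucket t ∈ pvLetters := by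
  unfold pvBucket
  by_cases hv : pvValid t
  · rw [if_pos hv]; exact pvLetter_mem t hv
  · rw [if_neg hv]; simp [pvLetters]

-- A's insert-if-absent-then-append is one dict.modify
lemma inner_two_stage (inner : PySem.Dict String (List String)) (cc : String) (t : String) :
    ((if inner.contains cc then inner else inner.insert cc []).insert cc
      ((if inner.contains cc then inner else inner.insert cc []).getD cc [] ++ [t]))
    = inner.modify cc [] (· ++ [t]) := by
  by_cases hc : inner.contains cc
  · simp only [if_pos hc]; rfl
  · simp only [if_neg hc, PySem.Dict.insert_insert_self, PySem.Dict.getD_insert_self,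
      List.nil_append, PySem.Dict.modify]
    rw [PySem.Dict.getD_of_not_contains _ _ (by simpa using hc)]
    simp

-- B's setdefault-then-append is the same dict.modify
lemma setdefault_two_stage (inner : PySem.Dict String (List String)) (cc : String) (t : String) :
    ((inner.setdefault cc []).insert cc ((inner.setdefault cc []).getD cc [] ++ [t]))
    = inner.modify cc [] (· ++ [t]) := by
  by_cases hc : inner.contains cc
  · rw [PySem.Dict.setdefault_of_contains _ _ hc]; rfl
  · rw [PySem.Dict.setdefault_of_not_contains _ _ (by simpa using hc)]
    have := inner_two_stage inner cc t
    rw [if_neg hc] at this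
    exact this

-- the loop invariant, shared by both ports: the outer dict always holds the 27 letters in order,
-- each with the fold of the per-bucket step over its own targets
lemma foldl_outer (step : PySem.Dict String (PySem.Dict String (List String)) → String →
      PySem.Dict String (PySem.Dict String (List String)))
    (hstep : ∀ d t, step d t = pvOuterStep d t) :
    ∀ (ts : List String) (d : PySem.Dict String (PySem.Dict String (List String)))
      (g : String → PySem.Dict String (List String)),
      d.items = pvLetters.map (fun L => (L, g L)) →
      (ts.foldl step d).items
        = pvLetters.map (fun L => (L, (ts.filter (fun t => pvBucket t == L)).foldl pvStep (g L))) := by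
  intro ts
  induction ts with
  | nil => intro d g hd; simpa using hd
  | cons t ts ih =>
    intro d g hd
    have hkeys : d.keys = pvLetters := by
      show d.items.map (fun p => p.1) = pvLetters
      rw [hd, List.map_map]
      exact List.map_id' pvLetters
    have hB : pvBucket t ∈ pvLetters := pvBucket_mem t
    have hcont : d.contains (pvBucket t) = true := by
      rw [PySem.Dict.contains_iff_mem_keys, hkeys]; exact hB
    have hget : d.getD (pvBucket t) PySem.Dict.empty = g (pvBucket t) := by
      refine PySem.Dict.getD_of_mem_items d ?_ ?_ _
      · rw [hd]; exact List.mem_map.mpr ⟨pvBucket t, hB, rfl⟩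
      · rw [hkeys]; exact pvLetters_nodup
    rw [List.foldl_cons, hstep]
    rw [ih (pvOuterStep d t) (fun L => if L = pvBucket t then pvStep (g (pvBucket t)) t else g L) ?_]
    · refine List.map_congr_left ?_
      intro L _
      by_cases hL : L = pvBucket t
      · subst hL
        simp only [List.filter_cons, beq_self_eq_true, if_pos, List.foldl_cons]
      · have : (pvBucket t == L) = false := by
          simpa using fun h => hL h.symm
        simp only [if_neg hL, List.filter_cons, this]
        simp
    · unfold pvOuterStep
      rw [PySem.Dict.items_insert_of_contains _ _ hcont, hd, List.map_map]
      refine List.map_congr_left ?_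
      intro L _
      by_cases hL : L = pvBucket t
      · subst hL
        simp [hget]
      · simp [hL]

-- ordering facts -------------------------------------------------------------

lemma take_lt (n : Nat) : ∀ (l₁ l₂ : List Char), l₁.take n < l₂.take n → l₁ < l₂ := by
  induction n with
  | zero => intro l₁ l₂ h; simp at h
  | succ n ih =>
    intro l₁ l₂ h
    cases l₁ with
    | nil =>
      cases l₂ with
      | nil => simp at h
      | cons b bs => exact List.nil_lt_cons b bs
    | cons a as =>
      cases l₂ with
      | nil => simp at h
      | cons b bs =>
        simp only [List.take_succ_cons] at h
        rw [List.cons_lt_cons_iff] at h ⊢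
        rcases h with h | ⟨he, h⟩
        · exact Or.inl h
        · exact Or.inr ⟨he, ih as bs h⟩

lemma take_le (n : Nat) (l₁ l₂ : List Char) (h : l₁ ≤ l₂) : l₁.take n ≤ l₂.take n := by
  by_contra hcon
  exact absurd (take_lt n l₂ l₁ (not_le.mp hcon)) (not_lt.mpr h)

lemma code_mono {a b : String} (hab : a ≤ b) : pvCode a ≤ pvCode b := by
  have ha : (pvCode a).toList = a.toList.take 9 := by simp [pvCode, pysem]
  have hb : (pvCode b).toList = b.toList.take 9 := by simp [pvCode, pysem]
  rw [String.le_iff_toList_le] at hab ⊢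
  rw [ha, hb]
  exact take_le 9 _ _ hab

lemma ofList_pairwise_le {xs : List String} (h : xs.Pairwise (· ≤ ·)) :
    (PySem.Set.ofList xs).Pairwise (· ≤ ·) := by
  induction xs with
  | nil => simp [PySem.Set.ofList_nil]
  | cons x xs ih =>
    rw [PySem.Set.ofList_cons]
    rcases List.pairwise_cons.mp h with ⟨hx, hxs⟩
    refine List.pairwise_cons.mpr ⟨?_, ?_⟩
    · intro y hy
      have : y ∈ PySem.Set.ofList xs := ((PySem.Set.mem_discard _ _ _).mp hy).1
      exact hx y ((PySem.Set.mem_ofList _ _).mp this)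
    · show (List.filter _ _).Pairwise _
      exact (ih hxs).filter _

-- sorted commutes with filter
lemma filter_sorted (p : String → Bool) (xs : List String) :
    (PySem.List.sorted xs (fun x => x)).filter p = PySem.List.sorted (xs.filter p) (fun x => x) := by
  symm
  apply PySem.List.sorted_id_eq_of_perm_of_pairwise
  · exact (PySem.List.sorted_perm xs (fun x => x) false).filter p
  · exact (PySem.List.sorted_pairwise xs (fun x => x)).filter p

-- ofList of codes of the sorted list is the sorted ofList of codes
lemma ofList_map_code_sorted (u : List String) :
    PySem.Set.ofList ((PySem.List.sorted u (fun x => x)).map pvCode)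
      = PySem.List.sorted (PySem.Set.ofList (u.map pvCode)) (fun x => x) := by
  symm
  apply PySem.List.sorted_eq_of_perm_of_pairwise_lt
  · refine (List.perm_ext_iff_of_nodup (PySem.Set.nodup_ofList _) (PySem.Set.nodup_ofList _)).mpr ?_
    intro c
    simp only [PySem.Set.mem_ofList, List.mem_map, PySem.List.mem_sorted]
  · have hle : ((PySem.List.sorted u (fun x => x)).map pvCode).Pairwise (· ≤ ·) := by
      rw [List.pairwise_map]
      refine (PySem.List.sorted_pairwise u (fun x => x)).imp ?_
      intro a b hab
      exact code_mono hab
    have h1 := ofList_pairwise_le hle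
    have h2 : (PySem.Set.ofList ((PySem.List.sorted u (fun x => x)).map pvCode)).Nodup :=
      PySem.Set.nodup_ofList _
    have := List.Pairwise.and h1 h2
    refine this.imp ?_
    intro a b ⟨hle', hne⟩
    exact lt_of_le_of_ne hle' hne

-- items of the per-letter group dict, alphabet letters
lemma group_items_letter (L : String) (hL : L ≠ "#") (ts : List String) :
    (pvGroup L ts).items
      = (PySem.Set.ofList ((ts.filter (fun t => pvBucket t == L)).map pvCode)).map
          (fun c => (c, (ts.filter (fun t => pvBucket t == L)).filter (fun t => pvCode t == c))) := by
  set u := ts.filter (fun t => pvBucket t == L) with hu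
  have huv : ∀ t ∈ u, pvValid t = true := by
    intro t ht
    have := (List.mem_filter.mp ht).2
    by_contra hv
    have hb : pvBucket t = "#" := by simp [pvBucket, hv]
    rw [hb] at this
    have heq : "#" = L := by simpa using this
    exact hL heq.symm
  have hkey : ∀ t ∈ u, pvKey t = pvCode t := by
    intro t ht; simp [pvKey, huv t ht]
  unfold pvGroup
  rw [pvInit, if_neg hL, ← hu]
  have hfold : u.foldl pvStep PySem.Dict.empty
      = (u.map (fun t => (pvKey t, t))).foldl (fun d p => d.modify p.1 [] (· ++ [p.2]))
          PySem.Dict.empty := by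
    rw [List.foldl_map]; rfl
  have hkeys : (u.foldl pvStep PySem.Dict.empty).keys = PySem.Set.ofList (u.map pvCode) := by
    unfold pvStep
    rw [PySem.Dict.keys_foldl_modify_key u pvKey ([] : List String)
      (fun _ x => fun v => v ++ [x]) PySem.Dict.empty]
    rw [PySem.Dict.keys_empty, PySem.Set.update_nil_left]
    congr 1
    exact List.map_congr_left hkey
  have hnd : (u.foldl pvStep PySem.Dict.empty).keys.Nodup := by
    rw [hkeys]; exact PySem.Set.nodup_ofList _
  rw [PySem.Dict.items_eq_map_keys _ hnd []]
  rw [hkeys]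
  refine List.map_congr_left ?_
  intro c _
  congr 1
  rw [hfold, PySem.Dict.getD_foldl_modify_append, PySem.Dict.getD_empty, List.nil_append]
  rw [List.filter_map]
  rw [List.map_map]
  have : (u.filter ((fun p => p.1 == c) ∘ fun t => (pvKey t, t))).map ((fun x => x.2) ∘ fun t => (pvKey t, t))
      = (u.filter ((fun p => p.1 == c) ∘ fun t => (pvKey t, t))).map id := rfl
  rw [this, List.map_id]
  refine List.filter_congr ?_
  intro t ht
  simp only [Function.comp]
  rw [hkey t ht]

-- items of the '#' group dict
lemma group_items_hash (ts : List String) :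
    (pvGroup "#" ts).items = [("Miscellaneous", ts.filter (fun t => !pvValid t))] := by
  have hfil : ts.filter (fun t => pvBucket t == "#") = ts.filter (fun t => !pvValid t) := by
    refine List.filter_congr ?_
    intro t _
    by_cases hv : pvValid t
    · have hb : pvBucket t = pvLetter t := by simp [pvBucket, hv]
      have hne : (pvLetter t == "#") = false := by
        simpa using pvLetter_ne_hash t hv
      rw [hb, hne]
      simp [hv]
    · have hb : pvBucket t = "#" := by simp [pvBucket, hv]
      have hv' : pvValid t = false := by simpa using hv
      simp [hb, hv']
  set u := ts.filter (fun t => pvBucket t == "#") with hu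
  have huv : ∀ t ∈ u, pvValid t = false := by
    intro t ht
    have := List.mem_filter.mp ht
    rcases Bool.eq_false_or_eq_true (pvValid t) with h | h
    · exfalso
      have hb : pvBucket t = pvLetter t := by simp [pvBucket, h]
      rw [hb] at this
      have heq : pvLetter t = "#" := by simpa using this.2
      exact pvLetter_ne_hash t h heq
    · exact h

  have hkey : ∀ t ∈ u, pvKey t = "Miscellaneous" := by
    intro t ht; simp [pvKey, huv t ht]
  unfold pvGroup
  rw [pvInit, if_pos rfl, ← hu]
  have hfold : u.foldl pvStep (PySem.Dict.mk [("Miscellaneous", [])])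
      = (u.map (fun t => (pvKey t, t))).foldl (fun d p => d.modify p.1 [] (· ++ [p.2]))
          (PySem.Dict.mk [("Miscellaneous", [])]) := by
    rw [List.foldl_map]; rfl
  have hkeys : (u.foldl pvStep (PySem.Dict.mk [("Miscellaneous", [])])).keys = ["Miscellaneous"] := by
    unfold pvStep
    rw [PySem.Dict.keys_foldl_modify_key u pvKey ([] : List String)
      (fun _ x => fun v => v ++ [x]) (PySem.Dict.mk [("Miscellaneous", [])])]
    rw [PySem.Set.update_eq_append_filter]
    have : ∀ y ∈ PySem.Set.ofList (u.map pvKey), y = "Miscellaneous" := by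
      intro y hy
      rcases List.mem_map.mp ((PySem.Set.mem_ofList _ _).mp hy) with ⟨t, ht, rfl⟩
      exact hkey t ht
    have hfe : (PySem.Set.ofList (u.map pvKey)).filter
        (fun y => !PySem.Set.contains (PySem.Dict.mk [("Miscellaneous", ([] : List String))]).keys y) = [] := by
      rw [List.filter_eq_nil_iff]
      intro y hy
      rw [this y hy]
      decide
    rw [hfe]
    simp [PySem.Dict.keys]
  have hnd : (u.foldl pvStep (PySem.Dict.mk [("Miscellaneous", [])])).keys.Nodup := by
    rw [hkeys]; simp
  rw [PySem.Dict.items_eq_map_keys _ hnd [], hkeys]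
  simp only [List.map_cons, List.map_nil]
  congr 2
  rw [hfold, PySem.Dict.getD_foldl_modify_append]
  have hd0 : (PySem.Dict.mk [("Miscellaneous", ([] : List String))]).getD "Miscellaneous" [] = [] := by rfl
  rw [hd0, List.nil_append]
  rw [List.filter_map, List.map_map]
  have h1 : (u.filter ((fun p => p.1 == "Miscellaneous") ∘ fun t => (pvKey t, t))) = u := by
    rw [List.filter_eq_self]
    intro t ht
    simp only [Function.comp]
    rw [hkey t ht]
    simp
  rw [h1]
  have h2 : u.map ((fun x => x.2) ∘ fun t => (pvKey t, t)) = u.map id := rfl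
  rw [h2, List.map_id]
  exact hfil

-- the per-letter normalisation equality
lemma entry_eq (L : String) (ts : List String) :
    (PySem.List.sorted (pvGroup L ts).items (fun q => q.1)).map
        (fun q => (q.1, PySem.List.sorted q.2 (fun x => x)))
      = (pvGroup L (PySem.List.sorted ts (fun x => x))).items := by
  by_cases hL : L = "#"
  · subst hL
    rw [group_items_hash, group_items_hash]
    have hs : PySem.List.sorted [(("Miscellaneous" : String), ts.filter (fun t => !pvValid t))]
        (fun q => q.1) = [("Miscellaneous", ts.filter (fun t => !pvValid t))] := by
      apply PySem.List.sorted_eq_self_of_pairwise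
      simp
    rw [hs]
    simp only [List.map_cons, List.map_nil]
    rw [filter_sorted]
  · rw [group_items_letter L hL, group_items_letter L hL]
    rw [filter_sorted (fun t => pvBucket t == L) ts]
    set u := ts.filter (fun t => pvBucket t == L) with hu
    have hsorted : PySem.List.sorted
        ((PySem.Set.ofList (u.map pvCode)).map
          (fun c => (c, u.filter (fun t => pvCode t == c)))) (fun q => q.1)
        = (PySem.List.sorted (PySem.Set.ofList (u.map pvCode)) (fun x => x)).map
            (fun c => (c, u.filter (fun t => pvCode t == c))) := by
      apply PySem.List.sorted_eq_of_perm_of_pairwise_lt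
      · exact (PySem.List.sorted_perm _ (fun x => x) false).map _
      · rw [List.pairwise_map]
        exact PySem.List.sorted_ofList_pairwise_lt _
    rw [hsorted, List.map_map, ofList_map_code_sorted]
    refine List.map_congr_left ?_
    intro c _
    simp only [Function.comp]
    rw [filter_sorted]

-- ===== VERDICT (by name: the statement is the Claim_ definition above) =====
theorem get_targets_dict_spec : Claim_equal_get_targets_dict := by
  unfold Claim_equal_get_targets_dict
  intro targets _
  simp only [Spec_get_targets_dict, get_targets_dict, get_targets_dict_alt]
  rw [show (PySem.Dict.ofList ((PySem.List.pyRange 65 91 1).map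
      (fun i => (String.ofList [Char.ofNat i.toNat],
        (PySem.Dict.empty : PySem.Dict String (List String)))))).insert "#"
      (PySem.Dict.ofList [("Miscellaneous", ([] : List String))]) = pvInitDict from rfl]
  have hstepA : ∀ d t,
      (fun alphas target =>
        if PySem.Str.len target ≤ 8 || !pv_is_course_code (PySem.Str.slice target none (some 9)) then
          alphas.insert "#" ((alphas.getD "#" PySem.Dict.empty).insert "Miscellaneous"
            ((alphas.getD "#" PySem.Dict.empty).getD "Miscellaneous" [] ++ [target]))
        else
          let leading_alpha := String.ofList [PySem.Chars.upperChar ((PySem.Str.pyGet? target 0).getD 'A')]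
          let course_code := PySem.Str.slice target none (some 9)
          let inner := alphas.getD leading_alpha PySem.Dict.empty
          let inner := if inner.contains course_code then inner else inner.insert course_code []
          alphas.insert leading_alpha (inner.insert course_code (inner.getD course_code [] ++ [target])))
        d t = pvOuterStep d t := by
    intro d t
    simp only [pv_guard_A]
    by_cases hv : pvValid t
    · simp only [hv, Bool.not_true, Bool.false_eq_true, if_false]
      show d.insert (pvLetter t) _ = _
      rw [inner_two_stage]
      simp [pvOuterStep, pvStep, pvBucket, pvKey, pvLetter, pvCode, hv]
    · simp only [hv, Bool.not_false, if_true]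
      simp [pvOuterStep, pvStep, pvBucket, pvKey, hv, PySem.Dict.modify]
  have hstepB : ∀ d t,
      (fun alphas target =>
        if decide (8 < PySem.Str.len target) && PySem.Str.strIsalpha (PySem.Str.slice target none (some 4)) &&
            PySem.Str.strIsdigit (PySem.Str.slice target (some 4) (some 8)) then
          let inner := (alphas.getD (String.ofList [PySem.Chars.upperChar ((PySem.Str.pyGet? target 0).getD 'A')])
              PySem.Dict.empty).setdefault (PySem.Str.slice target none (some 9)) []
          alphas.insert (String.ofList [PySem.Chars.upperChar ((PySem.Str.pyGet? target 0).getD 'A')])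
            (inner.insert (PySem.Str.slice target none (some 9))
              (inner.getD (PySem.Str.slice target none (some 9)) [] ++ [target]))
        else
          alphas.insert "#" ((alphas.getD "#" PySem.Dict.empty).insert "Miscellaneous"
            ((alphas.getD "#" PySem.Dict.empty).getD "Miscellaneous" [] ++ [target])))
        d t = pvOuterStep d t := by
    intro d t
    show (if pvValid t then _ else _) = _
    by_cases hv : pvValid t
    · simp only [hv, if_true]
      rw [setdefault_two_stage]
      simp [pvOuterStep, pvStep, pvBucket, pvKey, pvLetter, pvCode, hv]
    · simp only [hv, Bool.false_eq_true, if_false]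
      simp [pvOuterStep, pvStep, pvBucket, pvKey, hv, PySem.Dict.modify]
  rw [foldl_outer _ hstepA targets pvInitDict pvInit pvInitDict_items]
  rw [foldl_outer _ hstepB (PySem.List.sorted targets (fun x => x)) pvInitDict pvInit pvInitDict_items]
  rw [List.map_map, List.map_map]
  refine List.map_congr_left ?_
  intro L _
  simp only [Function.comp]
  exact congrArg (fun x => (L, x)) (entry_eq L targets)
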